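-- pv_equiv track=rewrite | github.com/KewalinSamart/CPBS7712_Day3 | src/compare_sequences.py | compute_keynum
-- ===== SOURCE A (Python) =====
-- def compute_keynum(kmer):
--     '''
--     This function computes numerical representation i.e. numeric kmer (keynum) of a given kmer
--     '''
--     kmer_char = list(reversed([*kmer]))
--     kmer_len = len(kmer)
--     key_val = 0
--     char_val = 0
--     for i in reversed(range(kmer_len)):
--         char = kmer_char[i]
--         if char == "A":
--             char_val = 0
--         elif char == "C":
--             char_val = 1
--         elif char == "G":
--             char_val = 2
--         elif char == "T":
--             char_val = 3
--         key_val = key_val + char_val*(4**i)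
--     return key_val
-- ===== SOURCE B (Python) =====
-- def compute_keynum(kmer):
--     '''
--     This function computes numerical representation i.e. numeric kmer (keynum) of a given kmer
--     '''
--     vals = {"A": 0, "C": 1, "G": 2, "T": 3}
--     key_val = 0
--     char_val = 0
--     for char in kmer:
--         char_val = vals.get(char, char_val)
--         key_val = key_val * 4 + char_val
--     return key_val
-- ===== Notes on version B (the rewrite author's own statement) =====
-- stated objective: faster
-- what changed: Replaces the reversed-list, reversed-range loop that computes a fresh big power 4**i on every iteration with a single left-to-right Horner pass (key_val = key_val*4 + val) using a dict lookup that keeps the previous value for non-ACGT characters, exactly as A's leftover char_val does.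
import Mathlib
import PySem

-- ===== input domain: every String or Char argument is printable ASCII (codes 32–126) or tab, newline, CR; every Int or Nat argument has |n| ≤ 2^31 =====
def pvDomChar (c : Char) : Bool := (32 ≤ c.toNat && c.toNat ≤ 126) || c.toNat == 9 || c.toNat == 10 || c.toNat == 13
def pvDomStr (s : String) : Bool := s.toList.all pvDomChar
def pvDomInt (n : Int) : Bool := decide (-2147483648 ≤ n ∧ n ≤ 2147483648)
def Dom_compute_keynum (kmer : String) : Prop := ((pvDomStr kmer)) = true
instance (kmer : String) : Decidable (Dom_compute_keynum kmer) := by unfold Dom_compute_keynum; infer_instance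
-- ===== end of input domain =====

-- B replaces the per-step 4**i powers over a reversed list with one Horner pass (key_val = key_val*4 + val): asymptotically fewer bit operations.


-- ===== PORT A =====
-- literal port: kmer_char = reversed char list; loop over reversed(range(kmer_len));
-- char_val is loop-carried state (unchanged for non-ACGT chars); key_val += char_val * 4**i
def compute_keynum (kmer : String) : Int :=
  let kmer_char : List Char := kmer.toList.reverse
  let kmer_len : Nat := kmer.toList.length
  let st := ((List.range kmer_len).reverse).foldl
    (fun (st : Int × Int) (i : Nat) =>
      let char := kmer_char.getD i ' '   -- index always in range in A
      let char_val : Int :=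
        if char = 'A' then 0
        else if char = 'C' then 1
        else if char = 'G' then 2
        else if char = 'T' then 3
        else st.2
      (st.1 + char_val * (4 : Int) ^ i, char_val))
    (0, 0)
  st.1

-- ===== PORT B =====
-- literal port of Source B: one Horner pass; vals.get(char, char_val) keeps the previous value
def pvVals : PySem.Dict Char Int := PySem.Dict.mk [('A', 0), ('C', 1), ('G', 2), ('T', 3)]  -- the dict literal (distinct keys)

def compute_keynum_alt (kmer : String) : Int :=
  let st := kmer.toList.foldl
    (fun (st : Int × Int) (char : Char) =>
      let char_val := pvVals.getD char st.2
      (st.1 * 4 + char_val, char_val))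
    (0, 0)
  st.1

-- ===== PRECONDITION & SPEC =====
def Spec_compute_keynum (kmer : String) (out : Int) : Prop := out = compute_keynum_alt kmer
instance (kmer : String) (out : Int) : Decidable (Spec_compute_keynum kmer out) := by unfold Spec_compute_keynum; infer_instance

-- ===== CLAIM (what is proved, stated in full; the proofs are below) =====
def Claim_equal_compute_keynum : Prop := ∀ (kmer : String), Dom_compute_keynum kmer → Spec_compute_keynum kmer (compute_keynum kmer)

-- ===== LEMMAS AND PROOFS =====

-- the character value used by both programs
def pvCV (c : Char) (prev : Int) : Int :=
  if c = 'A' then 0 else if c = 'C' then 1 else if c = 'G' then 2 else if c = 'T' then 3 else prev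

lemma pvVals_getD (c : Char) (prev : Int) : pvVals.getD c prev = pvCV c prev := by
  simp only [pvVals, PySem.Dict.getD_eq_get?_getD, PySem.Dict.get?_mk_cons, pvCV]
  by_cases h1 : c = 'A' <;> by_cases h2 : c = 'C' <;> by_cases h3 : c = 'G' <;> by_cases h4 : c = 'T' <;>
    simp_all [PySem.Dict.get?, Ne.symm]

-- B's loop body, with the if-chain character value
def pvStepB (st : Int × Int) (c : Char) : Int × Int := (st.1 * 4 + pvCV c st.2, pvCV c st.2)

-- Horner accumulator law: the starting key contributes k * 4^|cs|, and the carried char_val is independent of k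
lemma hornerB_acc (cs : List Char) : ∀ (k prev : Int),
    cs.foldl pvStepB (k, prev)
      = (k * 4 ^ cs.length + (cs.foldl pvStepB (0, prev)).1, (cs.foldl pvStepB (0, prev)).2) := by
  induction cs with
  | nil => intro k prev; simp
  | cons h t ih =>
      intro k prev
      simp only [List.foldl_cons, pvStepB, List.length_cons]
      rw [ih (k * 4 + pvCV h prev) (pvCV h prev), ih (0 * 4 + pvCV h prev) (pvCV h prev)]
      simp only [Prod.mk.injEq]
      exact ⟨by ring, trivial⟩

-- A's loop, generalized: folding over reversed indices with lookups in cs.reverse computes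
-- exactly the Horner pair of cs (key shifted by the starting accumulator k)
lemma loopA_eq_horner (cs : List Char) : ∀ (k prev : Int),
    ((List.range cs.length).reverse.foldl
      (fun (st : Int × Int) (i : Nat) =>
        (st.1 + pvCV (cs.reverse.getD i ' ') st.2 * (4 : Int) ^ i, pvCV (cs.reverse.getD i ' ') st.2))
      (k, prev))
    = (k + (cs.foldl pvStepB (0, prev)).1, (cs.foldl pvStepB (0, prev)).2) := by
  induction cs with
  | nil => intro k prev; simp
  | cons h t ih =>
      intro k prev
      have hlen : (h :: t).length = t.length + 1 := rfl
      rw [hlen, List.range_succ, List.reverse_append]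
      simp only [List.reverse_singleton, List.singleton_append, List.foldl_cons]
      have hget : (h :: t).reverse.getD t.length ' ' = h := by
        simp [List.reverse_cons, List.length_reverse]
      rw [hget]
      have hcongr :
          (List.range t.length).reverse.foldl
            (fun (st : Int × Int) (i : Nat) =>
              (st.1 + pvCV ((h :: t).reverse.getD i ' ') st.2 * (4 : Int) ^ i,
               pvCV ((h :: t).reverse.getD i ' ') st.2))
            (k + pvCV h prev * 4 ^ t.length, pvCV h prev)
          = (List.range t.length).reverse.foldl
            (fun (st : Int × Int) (i : Nat) =>
              (st.1 + pvCV (t.reverse.getD i ' ') st.2 * (4 : Int) ^ i,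
               pvCV (t.reverse.getD i ' ') st.2))
            (k + pvCV h prev * 4 ^ t.length, pvCV h prev) := by
        apply PySem.List.foldl_congr_mem
        intro acc i hi
        have hlt : i < t.length := by
          have := List.mem_reverse.mp hi
          exact List.mem_range.mp this
        have : (h :: t).reverse.getD i ' ' = t.reverse.getD i ' ' := by
          rw [List.reverse_cons, List.getD_append _ _ _ _ (by simpa using hlt)]
        rw [this]
      rw [hcongr, ih (k + pvCV h prev * 4 ^ t.length) (pvCV h prev)]
      have hstep : pvStepB (0, prev) h = (pvCV h prev, pvCV h prev) := by simp only [pvStepB]; norm_num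
      rw [hstep, hornerB_acc t (pvCV h prev) (pvCV h prev)]
      simp only [Prod.mk.injEq]
      exact ⟨by ring, trivial⟩

-- ===== VERDICT (by name: the statement is the Claim_ definition above) =====
theorem compute_keynum_spec : Claim_equal_compute_keynum := by
  intro kmer _
  unfold Spec_compute_keynum compute_keynum compute_keynum_alt
  show ((List.range kmer.toList.length).reverse.foldl
      (fun (st : Int × Int) (i : Nat) =>
        (st.1 + pvCV (kmer.toList.reverse.getD i ' ') st.2 * (4 : Int) ^ i,
         pvCV (kmer.toList.reverse.getD i ' ') st.2))
      (0, 0)).1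
    = (kmer.toList.foldl
        (fun (st : Int × Int) (char : Char) => (st.1 * 4 + pvVals.getD char st.2, pvVals.getD char st.2))
        (0, 0)).1
  have hB : (fun (st : Int × Int) (char : Char) =>
      (st.1 * 4 + pvVals.getD char st.2, pvVals.getD char st.2)) = pvStepB := by
    funext st c
    simp [pvVals_getD, pvStepB]
  rw [hB, loopA_eq_horner kmer.toList 0 0]
  simp
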